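-- pv_equiv track=rewrite | github.com/Omegaice/mcp-rdf-memory | src/mcp_rdf_memory/curie.py | is_curie
-- ===== SOURCE A (Python) =====
-- def is_curie(value: str) -> bool:
--     """Check if a string matches the CURIE pattern (prefix:localname).
--
--     A valid CURIE must:
--     - Not contain "://" (which indicates a full URI)
--     - Have exactly one colon separator
--     - Have a non-empty alphanumeric prefix (with optional _ or -)
--     - Have a non-empty local part
--
--     Args:
--         value: String to check for CURIE pattern
--
--     Returns:
--         True if the string matches CURIE pattern, False otherwise
--
--     Examples:
--         >>> is_curie("rdf:type")
--         True
--         >>> is_curie("schema:name")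
--         True
--         >>> is_curie("http://example.org/name")
--         False
--         >>> is_curie("no:colon:twice")
--         False
--         >>> is_curie("prefix:")
--         False
--         >>> is_curie(":localname")
--         False
--     """
--     # Return False if string contains "://" (full URI)
--     if "://" in value:
--         return False
--
--     # Check for exactly one colon separator
--     parts = value.split(":")
--     if len(parts) != 2:
--         return False
--
--     prefix, local = parts
--
--     # Validate prefix part is alphanumeric (with _ or -)
--     if not prefix:
--         return False
--
--     # Check if prefix contains only ASCII alphanumeric, underscore, or hyphen
--     for char in prefix:
--         if not (char.isascii() and (char.isalnum() or char in "_-")):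
--             return False
--
--     # Ensure local part is non-empty
--     return bool(local)
-- ===== SOURCE B (Python) =====
-- def is_curie(value: str) -> bool:
--     """Single left-to-right DFA scan for the CURIE shape: no split, no substring search.
--
--     States: 0 = before any prefix char, 1 = inside prefix, 2 = just after the colon,
--     3 = local part is exactly "/" so far, 4 = valid local part, 5 = dead.
--     Accepting states are 3 and 4.
--     """
--     state = 0
--     for c in value:
--         if state <= 1:
--             if c == ":":
--                 state = 2 if state == 1 else 5
--             elif c.isascii() and (c.isalnum() or c in "_-"):
--                 state = 1
--             else:
--                 state = 5
--         elif state == 2: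
--             state = 5 if c == ":" else (3 if c == "/" else 4)
--         elif state == 3:
--             state = 5 if c in ":/" else 4
--         elif state == 4:
--             state = 5 if c == ":" else 4
--         else:
--             break
--     return state in (3, 4)
-- ===== Notes on version B (the rewrite author's own statement) =====
-- stated objective: alternative
-- what changed: Replaces A's URI-marker substring search, split-on-colon and separate prefix character loop by a single left-to-right five-state DFA scan over the characters with no intermediate lists.
import Mathlib
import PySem

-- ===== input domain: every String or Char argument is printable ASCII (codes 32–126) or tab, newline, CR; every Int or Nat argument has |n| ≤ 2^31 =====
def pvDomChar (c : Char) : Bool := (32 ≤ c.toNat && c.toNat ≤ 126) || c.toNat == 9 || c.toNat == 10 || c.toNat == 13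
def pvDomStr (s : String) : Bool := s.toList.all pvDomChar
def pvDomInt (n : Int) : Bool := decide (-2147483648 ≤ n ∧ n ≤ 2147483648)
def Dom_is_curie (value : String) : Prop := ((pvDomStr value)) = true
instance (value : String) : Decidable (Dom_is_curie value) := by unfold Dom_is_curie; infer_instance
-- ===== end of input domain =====

-- B replaces A's split + substring search + prefix loop by a single left-to-right
-- five-state DFA scan over the characters (objective: alternative, same cost).


-- ===== PORT A =====
-- A's per-character prefix test: char.isascii() is ported by hand as codepoint ≤ 127 (exact);
-- `char in "_-"` on a single char is char = '_' or char = '-'.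
def pvCheckPrefixA : List Char → Bool
  | [] => true
  | c :: rest =>
    if !(c.toNat ≤ 127 && (PySem.Chars.isalnum c || c == '_' || c == '-')) then false
    else pvCheckPrefixA rest

def is_curie (value : String) : Bool :=
  if PySem.Str.isIn "://" value then false
  else
    let parts := PySem.Chars.splitOn value.toList ":".toList
    if parts.length ≠ 2 then false
    else
      let pre := parts.getD 0 []
      let loc := parts.getD 1 []
      if pre = [] then false
      else if !pvCheckPrefixA pre then false
      else !loc.isEmpty

-- ===== PORT B =====
-- B's DFA transition (states as in Source B: 0 start, 1 prefix, 2 after colon, 3 local "/", 4 local, 5 dead).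
def pvStep (state : Nat) (c : Char) : Nat :=
  if state ≤ 1 then
    if c == ':' then (if state == 1 then 2 else 5)
    else if c.toNat ≤ 127 && (PySem.Chars.isalnum c || c == '_' || c == '-') then 1
    else 5
  else if state == 2 then (if c == ':' then 5 else if c == '/' then 3 else 4)
  else if state == 3 then (if c == ':' || c == '/' then 5 else 4)
  else if state == 4 then (if c == ':' then 5 else 4)
  else 5
-- Source B breaks out of the loop in the dead state; folding pvStep keeps state 5, same result.
def is_curie_alt (value : String) : Bool :=
  let final := value.toList.foldl pvStep 0
  final == 3 || final == 4

-- ===== PRECONDITION & SPEC =====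
def Spec_is_curie (value : String) (out : Bool) : Prop := out = is_curie_alt value
instance (value : String) (out : Bool) : Decidable (Spec_is_curie value out) := by unfold Spec_is_curie; infer_instance

-- ===== CLAIM (what is proved, stated in full; the proofs are below) =====
def Claim_equal_is_curie : Prop := ∀ (value : String), Dom_is_curie value → Spec_is_curie value (is_curie value)

-- ===== LEMMAS AND PROOFS =====

-- the shared character class of a valid prefix character
def pvGood (c : Char) : Bool :=
  c.toNat ≤ 127 && (PySem.Chars.isalnum c || c == '_' || c == '-')

-- the common specification: cs = p ++ ':' :: l with a good non-empty prefix p and a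
-- non-empty, colon-free local part l that does not start with "//"
-- the local part is non-empty, colon-free and does not start with "//"
def pvLocalOK (l : List Char) : Prop := l ≠ [] ∧ ':' ∉ l ∧ ¬ ['/', '/'] <+: l

def PvP (cs : List Char) : Prop :=
  ∃ p l, cs = p ++ ':' :: l ∧ p ≠ [] ∧ (∀ c ∈ p, pvGood c = true) ∧ pvLocalOK l

-- reference single-character split (what splitOn.go computes for a one-char separator)
def pvSplit (cs : List Char) (cur : List Char) : List (List Char) :=
  match cs with
  | [] => [cur.reverse]
  | c :: rest => if c = ':' then cur.reverse :: pvSplit rest [] else pvSplit rest (c :: cur)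

lemma pvSplit_go (fuel : Nat) : ∀ (l cur : List Char) (acc : List (List Char)),
    l.length < fuel →
    PySem.Chars.splitOn.go [':'] fuel l cur acc = acc.reverse ++ pvSplit l cur := by
  induction fuel with
  | zero => intro l cur acc h; omega
  | succ n ih =>
    intro l cur acc h
    cases l with
    | nil => simp [PySem.Chars.splitOn.go, pvSplit]
    | cons c rest =>
      by_cases hc : c = ':'
      · subst hc
        have h1 : PySem.Chars.splitOn.go [':'] (n+1) (':' :: rest) cur acc
            = PySem.Chars.splitOn.go [':'] n rest [] (cur.reverse :: acc) := by
          simp [PySem.Chars.splitOn.go, List.isPrefixOf]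
        rw [h1, ih rest [] (cur.reverse :: acc) (by simp at h ⊢; omega)]
        simp [pvSplit]
      · have h1 : PySem.Chars.splitOn.go [':'] (n+1) (c :: rest) cur acc
            = PySem.Chars.splitOn.go [':'] n rest (c :: cur) acc := by
          simp [PySem.Chars.splitOn.go, List.isPrefixOf, Ne.symm hc]
        rw [h1, ih rest (c :: cur) acc (by simp at h ⊢; omega)]
        simp [pvSplit, hc]

lemma splitOn_eq_pvSplit (cs : List Char) :
    PySem.Chars.splitOn cs [':'] = pvSplit cs [] := by
  have := pvSplit_go (cs.length + 1) cs [] [] (by omega)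
  simpa [PySem.Chars.splitOn] using this

-- pvSplit of a colon-free list
lemma pvSplit_no_colon (l : List Char) (cur : List Char) (h : ':' ∉ l) :
    pvSplit l cur = [cur.reverse ++ l] := by
  induction l generalizing cur with
  | nil => simp [pvSplit]
  | cons c rest ih =>
    have hc : c ≠ ':' := fun e => h (e ▸ List.mem_cons_self ..)
    have hr : ':' ∉ rest := fun e => h (List.mem_cons_of_mem _ e)
    simp [pvSplit, hc, ih _ hr]

lemma pvSplit_decomp (p l : List Char) (cur : List Char) (hp : ':' ∉ p) (hl : ':' ∉ l) :
    pvSplit (p ++ ':' :: l) cur = [cur.reverse ++ p, l] := by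
  induction p generalizing cur with
  | nil => simp [pvSplit, pvSplit_no_colon l [] hl]
  | cons c rest ih =>
    have hc : c ≠ ':' := fun e => hp (e ▸ List.mem_cons_self ..)
    have hr : ':' ∉ rest := fun e => hp (List.mem_cons_of_mem _ e)
    simp [pvSplit, hc, ih _ hr]

lemma pvSplit_length (cs : List Char) (cur : List Char) :
    (pvSplit cs cur).length = cs.count ':' + 1 := by
  induction cs generalizing cur with
  | nil => simp [pvSplit]
  | cons c rest ih =>
    by_cases hc : c = ':'
    · subst hc; simp [pvSplit, ih]
    · simp [pvSplit, hc, ih]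

-- a list with exactly one colon decomposes uniquely
lemma count_one_decomp (cs : List Char) (h : cs.count ':' = 1) :
    ∃ p l, cs = p ++ ':' :: l ∧ ':' ∉ p ∧ ':' ∉ l := by
  induction cs with
  | nil => simp at h
  | cons c rest ih =>
    rw [List.count_cons] at h
    by_cases hc : c = ':'
    · subst hc
      refine ⟨[], rest, rfl, by simp, ?_⟩
      have : rest.count ':' = 0 := by simpa using h
      exact (List.count_eq_zero).1 this
    · have : rest.count ':' = 1 := by simpa [hc] using h
      obtain ⟨p, l, e, hp, hl⟩ := ih this
      exact ⟨c :: p, l, by simp [e], by simp [hp, Ne.symm hc], hl⟩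

lemma decomp_unique (p l s r : List Char) (hp : ':' ∉ p) (hl : ':' ∉ l)
    (h : p ++ ':' :: l = s ++ ':' :: r) : s = p ∧ r = l := by
  induction p generalizing s with
  | nil =>
    cases s with
    | nil =>
      have h' : l = r := by simpa using h
      exact ⟨rfl, h'.symm⟩
    | cons c s' =>
      injection h with h1 h2
      have : ':' ∈ l := by rw [h2]; exact List.mem_append_right _ (List.mem_cons_self ..)
      exact absurd this hl
  | cons a p' ih =>
    cases s with
    | nil =>
      injection h with h1 h2
      subst h1
      exact absurd (List.mem_cons_self ..) hp
    | cons c s' =>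
      injection h with h1 h2
      obtain ⟨rfl, hr⟩ := ih s' (fun e => hp (List.mem_cons_of_mem _ e)) h2
      exact ⟨by simp [h1], hr⟩

-- infix "://" ↔ local part starts with "//" (given the unique colon)
lemma infix_iff (p l : List Char) (hp : ':' ∉ p) (hl : ':' ∉ l) :
    [':', '/', '/'] <:+: (p ++ ':' :: l) ↔ ['/', '/'] <+: l := by
  constructor
  · rintro ⟨s, t, h⟩
    have h' : p ++ ':' :: l = s ++ ':' :: ('/' :: '/' :: t) := by
      simpa using h.symm
    obtain ⟨rfl, hr⟩ := decomp_unique p l s ('/' :: '/' :: t) hp hl h'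
    exact ⟨t, by simp [hr]⟩
  · rintro ⟨t, rfl⟩
    exact ⟨p, t, by simp⟩

-- A's character loop is the all-quantifier over pvGood
lemma checkPrefixA_cons (c : Char) (rest : List Char) :
    pvCheckPrefixA (c :: rest) = (if !pvGood c then false else pvCheckPrefixA rest) := rfl

lemma checkPrefixA_eq (p : List Char) :
    pvCheckPrefixA p = true ↔ ∀ c ∈ p, pvGood c = true := by
  induction p with
  | nil => simp [pvCheckPrefixA]
  | cons c rest ih => cases hg : pvGood c <;> simp [checkPrefixA_cons, hg, ih]

lemma good_ne_colon {c : Char} (h : pvGood c = true) : c ≠ ':' := by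
  rintro rfl; revert h; decide

-- A = true ↔ PvP
lemma portA_iff (value : String) : is_curie value = true ↔ PvP value.toList := by
  have hsp : PySem.Chars.splitOn value.toList ":".toList = pvSplit value.toList [] := by
    have h0 : ":".toList = [':'] := rfl
    rw [h0, splitOn_eq_pvSplit]
  have htl : "://".toList = [':', '/', '/'] := rfl
  constructor
  · intro h
    rw [is_curie] at h
    by_cases hin : PySem.Str.isIn "://" value = true
    · rw [if_pos hin] at h; cases h
    · rw [if_neg hin] at h
      simp only [Bool.not_eq_true] at hin
      by_cases hc : value.toList.count ':' = 1
      · obtain ⟨p, l, e, hp, hl⟩ := count_one_decomp _ hc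
        simp only [hsp] at h
        rw [e, pvSplit_decomp p l [] hp hl] at h
        simp only [List.length_cons, List.length_nil, List.getD] at h
        by_cases hp0 : p = []
        · simp [hp0] at h
        · by_cases hck : pvCheckPrefixA p = true
          · refine ⟨p, l, e, hp0, (checkPrefixA_eq p).1 hck, ?_, hl, ?_⟩
            · intro hl0
              simp [hp0, hck, hl0] at h
            · intro hpre
              have : [':', '/', '/'] <:+: value.toList := by
                rw [e]; exact (infix_iff p l hp hl).2 hpre
              have := (PySem.Str.isIn_iff_infix "://" value).2 (htl ▸ this)
              rw [hin] at this; cases this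
          · simp only [Bool.not_eq_true] at hck
            simp [hp0, hck] at h
      · simp only [hsp] at h
        rw [pvSplit_length] at h
        simp [hc] at h
  · rintro ⟨p, l, e, hp0, hgood, hl0, hlc, hsl⟩
    have hp : ':' ∉ p := fun hm => good_ne_colon (hgood _ hm) rfl
    have hin : PySem.Str.isIn "://" value = false := by
      rcases hb : PySem.Str.isIn "://" value with _ | _
      · rfl
      · have := (PySem.Str.isIn_iff_infix "://" value).1 hb
        rw [htl, e] at this
        exact absurd ((infix_iff p l hp hlc).1 this) hsl
    have hin2 : PySem.Chars.isIn [':', '/', '/'] value.toList = false := by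
      simpa using hin
    have hin' : ¬ PySem.Str.isIn "://" value = true := by simp [hin2]
    rw [is_curie, if_neg hin']
    simp only [hsp]
    rw [e, pvSplit_decomp p l [] hp hlc]
    simp [hp0, (checkPrefixA_eq p).2 hgood, hl0]

-- B's DFA: dead stays dead
lemma foldl_dead (l : List Char) : l.foldl pvStep 5 = 5 := by
  induction l with
  | nil => rfl
  | cons c rest ih => simpa [pvStep] using ih

lemma foldl_state4 (l : List Char) : l.foldl pvStep 4 = if ':' ∈ l then 5 else 4 := by
  induction l with
  | nil => simp
  | cons c rest ih =>
    by_cases hc : c = ':'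
    · subst hc; simp [pvStep, foldl_dead]
    · simp [pvStep, hc, ih, Ne.symm hc]

lemma accept_state2 (l : List Char) :
    (l.foldl pvStep 2 = 3 ∨ l.foldl pvStep 2 = 4) ↔ pvLocalOK l := by
  unfold pvLocalOK
  cases l with
  | nil => simp
  | cons c t =>
    by_cases hc : c = ':'
    · subst hc; simp [pvStep, foldl_dead]
    · by_cases hs : c = '/'
      · subst hs
        cases t with
        | nil => simp [pvStep]
        | cons d u =>
          by_cases hd : d = ':'
          · subst hd; simp [pvStep, foldl_dead]
          · by_cases hds : d = '/'
            · subst hds; simp [pvStep, foldl_dead]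
            · simp only [List.foldl_cons]
              have e1 : pvStep 2 '/' = 3 := by decide
              have e2 : pvStep 3 d = 4 := by simp [pvStep, hd, hds]
              rw [e1, e2, foldl_state4]
              by_cases hu : ':' ∈ u <;>
                simp [hu, Ne.symm hd, List.cons_prefix_cons, Ne.symm hds]
      · simp only [List.foldl_cons]
        have e1 : pvStep 2 c = 4 := by simp [pvStep, hc, hs]
        rw [e1, foldl_state4]
        by_cases ht : ':' ∈ t <;>
          simp [ht, Ne.symm hc, List.cons_prefix_cons, Ne.symm hs]

lemma accept_state1 (cs : List Char) :
    (cs.foldl pvStep 1 = 3 ∨ cs.foldl pvStep 1 = 4) ↔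
      ∃ p l, cs = p ++ ':' :: l ∧ (∀ c ∈ p, pvGood c = true) ∧ pvLocalOK l := by
  induction cs with
  | nil =>
    simp only [List.foldl_nil]
    constructor
    · rintro (h | h) <;> cases h
    · rintro ⟨p, l, e, -, -⟩; cases p <;> simp at e
  | cons c t ih =>
    simp only [List.foldl_cons]
    by_cases hc : c = ':'
    · subst hc
      have e1 : pvStep 1 ':' = 2 := by decide
      rw [e1, accept_state2]
      constructor
      · intro h; exact ⟨[], t, rfl, by simp, h⟩
      · rintro ⟨p, l, e, hgood, hok⟩
        cases p with
        | nil =>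
          injection e with e1 e2
          exact e2 ▸ hok
        | cons a p' =>
          injection e with e1 e2
          exact absurd (good_ne_colon (hgood a (List.mem_cons_self ..))) (by simp [e1.symm])
    · by_cases hg : pvGood c = true
      · have e1 : pvStep 1 c = 1 := by
          simp only [pvStep]
          have h2 : (c == ':') = false := by simp [hc]
          rw [h2]
          simp only [pvGood] at hg
          simp [hg]
        rw [e1, ih]
        constructor
        · rintro ⟨p, l, e, hgood, hok⟩
          exact ⟨c :: p, l, by simp [e],
            fun x hx => (List.mem_cons.1 hx).elim (fun e' => by rw [e']; exact hg) (hgood x), hok⟩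
        · rintro ⟨p, l, e, hgood, hok⟩
          cases p with
          | nil =>
            injection e with e1 e2
            exact absurd e1 hc
          | cons a p' =>
            injection e with e1 e2
            exact ⟨p', l, e2, fun x hx => hgood x (List.mem_cons_of_mem _ hx), hok⟩
      · have e1 : pvStep 1 c = 5 := by
          simp only [pvStep]
          have h2 : (c == ':') = false := by simp [hc]
          rw [h2]
          simp only [pvGood] at hg
          simp only [Bool.not_eq_true] at hg
          simp [hg]
        rw [e1, foldl_dead]
        constructor
        · rintro (h | h) <;> cases h
        · rintro ⟨p, l, e, hgood, -⟩
          cases p with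
          | nil =>
            injection e with e1 e2
            exact absurd e1 hc
          | cons a p' =>
            injection e with e1 e2
            subst e1
            exact absurd (hgood c (List.mem_cons_self ..)) (by simp [hg])

lemma portB_iff (value : String) : is_curie_alt value = true ↔ PvP value.toList := by
  unfold is_curie_alt PvP
  simp only [Bool.or_eq_true, beq_iff_eq]
  cases hcs : value.toList with
  | nil =>
    simp only [List.foldl_nil]
    constructor
    · rintro (h | h) <;> cases h
    · rintro ⟨p, l, e, -, -, -⟩; cases p <;> simp at e
  | cons c t =>
    simp only [List.foldl_cons]
    by_cases hc : c = ':'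
    · subst hc
      have e1 : pvStep 0 ':' = 5 := by decide
      rw [e1, foldl_dead]
      constructor
      · rintro (h | h) <;> cases h
      · rintro ⟨p, l, e, hp0, hgood, -⟩
        cases p with
        | nil => exact absurd rfl hp0
        | cons a p' =>
          injection e with e1 e2
          exact absurd (good_ne_colon (hgood a (List.mem_cons_self ..))) (by simp [e1.symm])
    · by_cases hg : pvGood c = true
      · have e1 : pvStep 0 c = 1 := by
          simp only [pvStep]
          have h2 : (c == ':') = false := by simp [hc]
          rw [h2]
          simp only [pvGood] at hg
          simp [hg]
        rw [e1]
        rw [show (t.foldl pvStep 1 = 3 ∨ t.foldl pvStep 1 = 4) ↔ _ from accept_state1 t]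
        constructor
        · rintro ⟨p, l, e, hgood, hok⟩
          exact ⟨c :: p, l, by simp [e], by simp,
            fun x hx => (List.mem_cons.1 hx).elim (fun e' => by rw [e']; exact hg) (hgood x), hok⟩
        · rintro ⟨p, l, e, -, hgood, hok⟩
          cases p with
          | nil =>
            injection e with e1 e2
            exact absurd e1 hc
          | cons a p' =>
            injection e with e1 e2
            exact ⟨p', l, e2, fun x hx => hgood x (List.mem_cons_of_mem _ hx), hok⟩
      · have e1 : pvStep 0 c = 5 := by
          simp only [pvStep]
          have h2 : (c == ':') = false := by simp [hc]
          rw [h2]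
          simp only [pvGood] at hg
          simp only [Bool.not_eq_true] at hg
          simp [hg]
        rw [e1, foldl_dead]
        constructor
        · rintro (h | h) <;> cases h
        · rintro ⟨p, l, e, -, hgood, -⟩
          cases p with
          | nil =>
            injection e with e1 e2
            exact absurd e1 hc
          | cons a p' =>
            injection e with e1 e2
            subst e1
            exact absurd (hgood c (List.mem_cons_self ..)) (by simp [hg])


-- ===== VERDICT (by name: the statement is the Claim_ definition above) =====
theorem is_curie_spec : Claim_equal_is_curie := by
  intro value _
  unfold Spec_is_curie
  by_cases h : PvP value.toList
  · rw [(portA_iff value).2 h, ((portB_iff value).2 h).symm]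
  · have ha := (not_congr (portA_iff value)).2 h
    have hb := (not_congr (portB_iff value)).2 h
    simp only [Bool.not_eq_true] at ha hb
    rw [ha, hb]
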